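-- pv_equiv track=rewrite | github.com/hojoungjang/programming-exercises | 2302-극장-좌석/solution.py | solution
-- ===== SOURCE A (Python) =====
-- def solution(n, vips):
--     two_away = 0
--     one_away = 1
--     vips = set(vips)
--
--     for num in range(1, n + 1):
--         if num in vips or num - 1 in vips:
--             one_away, two_away = one_away, one_away
--         else:
--             one_away, two_away = one_away + two_away, one_away
--
--     return one_away
-- ===== SOURCE B (Python) =====
-- def _fib(k):
--     # F(k) with F(0)=0, F(1)=1, by fast doubling
--     def fd(k):
--         if k == 0:
--             return (0, 1)
--         a, b = fd(k >> 1)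
--         c = a * (2 * b - a)
--         d = a * a + b * b
--         if k & 1:
--             return (d, c + d)
--         return (c, d)
--     return fd(k)[0]
--
-- def solution(n, vips):
--     if n <= 0:
--         return 1
--     result = 1
--     prev = 0
--     for v in sorted({x for x in vips if 1 <= x <= n}):
--         # free segment prev+1 .. v-1 has length v-prev-1 and contributes F(length+1)
--         result *= _fib(v - prev)
--         prev = v
--     return result * _fib(n - prev + 1)
-- ===== Notes on version B (the rewrite author's own statement) =====
-- stated objective: faster
-- what changed: Replaces the O(n) seat-by-seat Fibonacci-style loop with a product of fast-doubling Fibonacci numbers over the free segments between sorted VIP seats.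
import Mathlib
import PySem

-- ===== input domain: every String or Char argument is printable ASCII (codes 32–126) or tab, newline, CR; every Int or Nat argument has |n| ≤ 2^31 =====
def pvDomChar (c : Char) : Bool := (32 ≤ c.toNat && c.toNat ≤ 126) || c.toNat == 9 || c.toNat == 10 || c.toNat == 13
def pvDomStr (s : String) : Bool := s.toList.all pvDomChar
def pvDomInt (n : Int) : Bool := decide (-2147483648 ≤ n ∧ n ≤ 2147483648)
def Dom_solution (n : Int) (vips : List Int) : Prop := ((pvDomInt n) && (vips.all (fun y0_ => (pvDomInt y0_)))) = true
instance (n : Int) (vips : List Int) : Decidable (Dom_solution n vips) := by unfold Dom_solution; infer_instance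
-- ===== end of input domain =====

-- B replaces A's O(n) seat-by-seat loop by a product of fast-doubling Fibonacci numbers
-- over the free segments between the sorted VIP seats (objective: faster).

-- ===== PORT A =====
-- state (one_away, two_away), initial (1, 0), loop over range(1, n+1)
def solution (n : Int) (vips : List Int) : Int :=
  let vs : PySem.Set Int := PySem.Set.ofList vips
  ((PySem.List.pyRange 1 (n + 1) 1).foldl
    (fun (st : Int × Int) num =>
      if PySem.Set.contains vs num || PySem.Set.contains vs (num - 1) then (st.1, st.1)
      else (st.1 + st.2, st.1))
    (1, 0)).1

-- ===== PORT B =====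
-- fast-doubling pair (F k, F (k+1)); Source B's fd, exact for the nonnegative arguments Source B passes
def fdAlt (k : Nat) : Int × Int :=
  if _h : k = 0 then (0, 1)
  else
    let p := fdAlt (k / 2)
    let c := p.1 * (2 * p.2 - p.1)
    let d := p.1 * p.1 + p.2 * p.2
    if k % 2 = 1 then (d, c + d) else (c, d)
decreasing_by exact Nat.div_lt_self (Nat.pos_of_ne_zero _h) (by norm_num)

-- Source B's _fib (only ever called with k ≥ 1)
def fibAlt (k : Int) : Int := (fdAlt k.toNat).1

def solution_alt (n : Int) (vips : List Int) : Int :=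
  if n ≤ 0 then 1
  else
    let seats := PySem.List.sorted
      (PySem.Set.ofList (vips.filter (fun x => decide (1 ≤ x ∧ x ≤ n)))) (fun x => x) false
    let st := seats.foldl (fun (st : Int × Int) v => (st.1 * fibAlt (v - st.2), v)) (1, 0)
    st.1 * fibAlt (n - st.2 + 1)

-- ===== PRECONDITION & SPEC =====
def Spec_solution (n : Int) (vips : List Int) (out : Int) : Prop := out = solution_alt n vips
instance (n : Int) (vips : List Int) (out : Int) : Decidable (Spec_solution n vips out) := by unfold Spec_solution; infer_instance

-- ===== CLAIM (what is proved, stated in full; the proofs are below) =====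
def Claim_equal_solution : Prop := ∀ (n : Int) (vips : List Int), Dom_solution n vips → Spec_solution n vips (solution n vips)

-- ===== LEMMAS AND PROOFS =====

-- Fibonacci over Int
def F (k : Nat) : Int := (Nat.fib k : Int)

theorem F_add_two (k : Nat) : F (k + 2) = F (k + 1) + F k := by
  unfold F; rw [Nat.fib_add_two]; push_cast; ring

theorem F_two_mul (m : Nat) : F (2 * m) = F m * (2 * F (m + 1) - F m) := by
  have hle : Nat.fib m ≤ 2 * Nat.fib (m + 1) := by
    have := Nat.fib_le_fib_succ (n := m); omega
  unfold F
  rw [Nat.fib_two_mul, Nat.cast_mul, Nat.cast_sub hle]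
  push_cast; ring

theorem F_two_mul_add_one (m : Nat) : F (2 * m + 1) = F (m + 1) * F (m + 1) + F m * F m := by
  unfold F; rw [Nat.fib_two_mul_add_one]; push_cast; ring

theorem fdAlt_eq (k : Nat) : fdAlt k = (F k, F (k + 1)) := by
  induction k using Nat.strong_induction_on with
  | _ k ih =>
    rw [fdAlt]
    by_cases h0 : k = 0
    · subst h0; simp [F]
    · have ihh := ih (k / 2) (Nat.div_lt_self (Nat.pos_of_ne_zero h0) (by norm_num))
      simp only [h0, dite_false, ihh]
      by_cases hp : k % 2 = 1
      · obtain ⟨m, hm⟩ : ∃ m, k = 2 * m + 1 := ⟨k / 2, by omega⟩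
        subst hm
        have hd : (2 * m + 1) / 2 = m := by omega
        simp only [hp, if_true, hd, Prod.mk.injEq]
        refine ⟨?_, ?_⟩
        · rw [F_two_mul_add_one]; ring
        · rw [show 2 * m + 1 + 1 = 2 * m + 2 from rfl, F_add_two, F_two_mul,
            F_two_mul_add_one]; ring
      · obtain ⟨m, hm⟩ : ∃ m, k = 2 * m := ⟨k / 2, by omega⟩
        subst hm
        have hd : 2 * m / 2 = m := by omega
        simp only [if_neg hp, hd, Prod.mk.injEq]
        refine ⟨?_, ?_⟩
        · rw [F_two_mul]
        · rw [F_two_mul_add_one]; ring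

theorem fibAlt_eq (k : Int) : fibAlt k = F k.toNat := by
  simp [fibAlt, fdAlt_eq]

-- spec recursion: (product of F(seg+1) over finished free segments, length of current free run)
def QL (mem : Int → Bool) : Nat → Int × Nat
  | 0 => (1, 0)
  | m + 1 =>
    let p := QL mem m
    if mem ((m : Int) + 1) then (p.1 * F (p.2 + 1), 0) else (p.1, p.2 + 1)

theorem QL_snd_zero (mem : Int → Bool) (m : Nat) (h : mem (m : Int) = true) :
    (QL mem m).2 = 0 := by
  cases m with
  | zero => simp [QL]
  | succ k =>
    have h' : mem ((k : Int) + 1) = true := by push_cast at h; exact h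
    simp [QL, h']

def stepA (mem : Int → Bool) (st : Int × Int) (num : Int) : Int × Int :=
  if mem num || mem (num - 1) then (st.1, st.1) else (st.1 + st.2, st.1)

def runA (mem : Int → Bool) (m : Nat) : Int × Int :=
  ((List.range m).map (fun k => ((1 : Int) + (k : Nat)))).foldl (stepA mem) (1, 0)

theorem runA_succ (mem : Int → Bool) (m : Nat) :
    runA mem (m + 1) = stepA mem (runA mem m) ((m : Int) + 1) := by
  unfold runA
  rw [List.range_succ, List.map_append, List.foldl_append]
  simp only [List.map_cons, List.map_nil, List.foldl_cons, List.foldl_nil]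
  rw [add_comm (1 : Int) (m : Int)]

theorem invA (mem : Int → Bool) (m : Nat) :
    (runA mem m).1 = (QL mem m).1 * F ((QL mem m).2 + 1) ∧
    ((runA mem m).2 = (QL mem m).1 * F (QL mem m).2 ∨
      (mem (m : Int) = true ∧ (runA mem m).2 = (runA mem m).1)) := by
  induction m with
  | zero =>
    refine ⟨by simp [runA, QL, F], Or.inl ?_⟩
    simp [runA, QL, F]
  | succ m ih =>
    obtain ⟨ih1, ih2⟩ := ih
    rw [runA_succ]
    have ecast : (((m + 1 : Nat)) : Int) = (m : Int) + 1 := by push_cast; ring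
    have earg : (m : Int) + 1 - 1 = (m : Int) := by ring
    by_cases hm1 : mem ((m : Int) + 1) = true
    · have hql : QL mem (m + 1) = ((QL mem m).1 * F ((QL mem m).2 + 1), 0) := by
        simp [QL, hm1]
      have hstep : stepA mem (runA mem m) ((m : Int) + 1) = ((runA mem m).1, (runA mem m).1) := by
        simp [stepA, hm1]
      rw [hstep, hql]
      refine ⟨by simpa [F] using ih1, Or.inr ⟨by rw [ecast]; exact hm1, rfl⟩⟩
    · have hql : QL mem (m + 1) = ((QL mem m).1, (QL mem m).2 + 1) := by
        simp [QL, hm1]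
      by_cases hm0 : mem (m : Int) = true
      · have hl : (QL mem m).2 = 0 := QL_snd_zero mem m hm0
        have hstep : stepA mem (runA mem m) ((m : Int) + 1) = ((runA mem m).1, (runA mem m).1) := by
          simp [stepA, earg, hm0]
        rw [hstep, hql]
        constructor
        · rw [ih1, hl]; norm_num [F]
        · left; rw [ih1, hl]
      · have ih2' : (runA mem m).2 = (QL mem m).1 * F (QL mem m).2 := by
          rcases ih2 with h | ⟨hc, _⟩
          · exact h
          · exact absurd hc hm0
        have hstep : stepA mem (runA mem m) ((m : Int) + 1) =
            ((runA mem m).1 + (runA mem m).2, (runA mem m).1) := by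
          simp [stepA, earg, hm1, hm0]
        rw [hstep, hql]
        constructor
        · rw [ih1, ih2', show (QL mem m).2 + 1 + 1 = (QL mem m).2 + 2 from rfl, F_add_two]
          ring
        · left; rw [ih1]
theorem QL_add (mem : Int → Bool) (m k : Nat)
    (h : ∀ j : Nat, m < j → j ≤ m + k → mem (j : Int) = false) :
    (QL mem (m + k)).1 = (QL mem m).1 ∧ (QL mem (m + k)).2 = (QL mem m).2 + k := by
  induction k with
  | zero => simp
  | succ k ih =>
    have hx : mem (((m + k : Nat) : Int) + 1) = false := by
      have := h (m + k + 1) (by omega) (by omega)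
      push_cast at this ⊢
      exact this
    have ihh := ih (fun j hj1 hj2 => h j hj1 (by omega))
    rw [show m + (k + 1) = (m + k) + 1 from rfl]
    simp only [QL, hx, Bool.false_eq_true, if_false]
    exact ⟨ihh.1, by omega⟩

def runB (r : List Int) : Int × Int :=
  r.foldl (fun (st : Int × Int) v => (st.1 * F (v - st.2).toNat, v)) (1, 0)

theorem runB_append (r : List Int) (v : Int) :
    runB (r ++ [v]) = ((runB r).1 * F (v - (runB r).2).toNat, v) := by
  simp [runB, List.foldl_append]

theorem gapB (mem : Int → Bool) (r : List Int) (m : Nat)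
    (hs : r.Pairwise (· < ·))
    (hb : ∀ x ∈ r, 1 ≤ x ∧ x ≤ (m : Int))
    (hm : ∀ x : Int, 1 ≤ x → x ≤ (m : Int) → mem x = decide (x ∈ r)) :
    (runB r).1 * F ((m : Int) - (runB r).2 + 1).toNat =
      (QL mem m).1 * F ((QL mem m).2 + 1) := by
  induction r using List.reverseRecOn generalizing m with
  | nil =>
    have hQ := QL_add mem 0 m (fun j hj1 hj2 => by
      have := hm (j : Int) (by omega) (by omega)
      simpa using this)
    simp only [Nat.zero_add] at hQ
    have h1 : (QL mem m).1 = 1 := by rw [hQ.1]; simp [QL]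
    have h2 : (QL mem m).2 = m := by rw [hQ.2]; simp [QL]
    have h3 : ((m : Int) - (runB []).2 + 1).toNat = m + 1 := by
      simp only [runB, List.foldl_nil]; omega
    rw [h1, h2, h3]
    simp [runB]
  | append_singleton r' v ih =>
    obtain ⟨hs', -, hrel⟩ := List.pairwise_append.mp hs
    have hvr' : ∀ x ∈ r', x < v := fun x hx => hrel x hx v (List.mem_singleton.mpr rfl)
    have hv := hb v (by simp)
    set V := v.toNat with hVdef
    have hvV : (V : Int) = v := Int.toNat_of_nonneg (by omega)
    have hV1 : 1 ≤ V := by omega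
    have hVm : V ≤ m := by omega
    -- no VIP strictly above v and at most m
    have hsplit := QL_add mem V (m - V) (fun j hj1 hj2 => by
      have hj1' : (1 : Int) ≤ (j : Int) := by omega
      have hj2' : (j : Int) ≤ (m : Int) := by omega
      rw [hm (j : Int) hj1' hj2']
      have hne : (j : Int) ≠ v := by omega
      have hnr : (j : Int) ∉ r' := fun hmem => by
        have := hvr' _ hmem; omega
      simp [List.mem_append, hne, hnr])
    have hmV : m = V + (m - V) := by omega
    -- QL at V: v is a VIP
    have hmemv : mem (((V - 1 : Nat) : Int) + 1) = true := by
      have hcast : ((V - 1 : Nat) : Int) + 1 = v := by omega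
      rw [hcast, hm v (by omega) (by omega)]
      simp
    have hql : QL mem V = ((QL mem (V - 1)).1 * F ((QL mem (V - 1)).2 + 1), 0) := by
      conv_lhs => rw [show V = (V - 1) + 1 from by omega]
      simp only [QL, hmemv, if_true]
    have ihh := ih (V - 1) hs'
      (fun x hx => ⟨(hb x (by simp [hx])).1, by have := hvr' x hx; omega⟩)
      (fun x hx1 hx2 => by
        rw [hm x hx1 (by omega)]
        have hne : x ≠ v := by omega
        simp [List.mem_append, hne])
    rw [runB_append]
    have e1 : (v - (runB r').2).toNat = (((V - 1 : Nat) : Int) - (runB r').2 + 1).toNat := by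
      omega
    have e2 : ((m : Int) - v + 1).toNat = (m - V) + 1 := by omega
    calc (runB r').1 * F (v - (runB r').2).toNat * F ((m : Int) - v + 1).toNat
        = ((runB r').1 * F (((V - 1 : Nat) : Int) - (runB r').2 + 1).toNat) *
            F ((m - V) + 1) := by rw [e1, e2]
      _ = ((QL mem (V - 1)).1 * F ((QL mem (V - 1)).2 + 1)) * F ((m - V) + 1) := by rw [ihh]
      _ = (QL mem m).1 * F ((QL mem m).2 + 1) := by
            conv_rhs => rw [hmV, hsplit.1, hsplit.2, hql]
            norm_num

-- ===== VERDICT (by name: the statement is the Claim_ definition above) =====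
theorem contains_ofList_eq (vips : List Int) (x : Int) :
    PySem.Set.contains (PySem.Set.ofList vips) x = decide (x ∈ vips) := by
  by_cases hx : x ∈ vips
  · simp [hx]
  · simp only [hx, decide_false]
    rw [Bool.eq_false_iff]
    intro hc
    exact hx ((PySem.Set.mem_ofList _ _).mp ((PySem.Set.contains_iff _ _).mp hc))

theorem solution_spec : Claim_equal_solution := by
  intro n vips _
  unfold Spec_solution solution solution_alt
  by_cases hn : n ≤ 0
  · rw [if_pos hn, PySem.List.pyRange_one_eq_nil (by omega)]
    simp
  · rw [if_neg hn]
    have hn1 : 1 ≤ n := by omega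
    have hNc : ((n.toNat : Nat) : Int) = n := Int.toNat_of_nonneg (by omega)
    set mem : Int → Bool := fun x => PySem.Set.contains (PySem.Set.ofList vips) x with hmemdef
    set seats := PySem.List.sorted
      (PySem.Set.ofList (vips.filter (fun x => decide (1 ≤ x ∧ x ≤ n)))) (fun x => x) false
      with hseats
    show ((PySem.List.pyRange 1 (n + 1) 1).foldl
        (fun (st : Int × Int) num =>
          if mem num || mem (num - 1) then (st.1, st.1)
          else (st.1 + st.2, st.1)) (1, 0)).1 =
      (seats.foldl (fun (st : Int × Int) v => (st.1 * fibAlt (v - st.2), v)) (1, 0)).1 *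
        fibAlt (n - (seats.foldl (fun (st : Int × Int) v => (st.1 * fibAlt (v - st.2), v)) (1, 0)).2 + 1)
    have hA : (PySem.List.pyRange 1 (n + 1) 1).foldl
        (fun (st : Int × Int) num =>
          if mem num || mem (num - 1) then (st.1, st.1)
          else (st.1 + st.2, st.1)) (1, 0) = runA mem n.toNat := by
      rw [PySem.List.pyRange_one, show n + 1 - 1 = n from by ring]
      rfl
    have hBfun : (fun (st : Int × Int) v => (st.1 * fibAlt (v - st.2), v)) =
        (fun (st : Int × Int) v => (st.1 * F (v - st.2).toNat, v)) := by
      funext st v; rw [fibAlt_eq]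
    have hmem_seats : ∀ x : Int, x ∈ seats ↔ x ∈ vips ∧ 1 ≤ x ∧ x ≤ n := by
      intro x
      rw [hseats, PySem.List.mem_sorted, PySem.Set.mem_ofList, List.mem_filter]
      simp
    have hgap := gapB mem seats n.toNat
      (PySem.List.sorted_ofList_pairwise_lt _)
      (fun x hx => by
        have := (hmem_seats x).mp hx
        exact ⟨this.2.1, by rw [hNc]; exact this.2.2⟩)
      (fun x hx1 hx2 => by
        show PySem.Set.contains (PySem.Set.ofList vips) x = decide (x ∈ seats)
        rw [contains_ofList_eq]
        have hxn : x ≤ n := by rw [hNc] at hx2; exact hx2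
        by_cases hxv : x ∈ vips
        · simp [hxv, (hmem_seats x).mpr ⟨hxv, hx1, hxn⟩]
        · simp only [hxv, decide_false]
          have : x ∉ seats := fun hc => hxv ((hmem_seats x).mp hc).1
          simp [this])
    have hinv := invA mem n.toNat
    rw [hA, hinv.1, hBfun, fibAlt_eq]
    show (QL mem n.toNat).1 * F ((QL mem n.toNat).2 + 1) =
      (runB seats).1 * F ((n - (runB seats).2 + 1)).toNat
    rw [← hNc]
    exact hgap.symm
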